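-- pv_equiv track=rewrite | github.com/pollyweb-org/pollyweb-docs | .tools/links/link_replacements/patterns.py | pick_matching_link
-- ===== SOURCE A (Python) =====
-- from typing import Iterable, List, Sequence, Tuple
--
-- LinkEntry = Tuple[str, str]
--
-- IndexedLinkEntry = Tuple[str, str, str]
--
-- def pick_matching_link(token: str, links: Sequence[IndexedLinkEntry | LinkEntry]):
--     """Return `(href, base_path)` pair matching the token, or `(None, None)`."""
--     token_lower = token.lower()
--
--     for entry in links:
--         if len(entry) == 2:
--             text, href = entry  # type: ignore[misc]
--             base = None
--         else:
--             base, text, href = entry  # type: ignore[misc]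
--         if token in href:
--             return href, base
--
--     for entry in links:
--         if len(entry) == 2:
--             text, href = entry  # type: ignore[misc]
--             base = None
--         else:
--             base, text, href = entry  # type: ignore[misc]
--         if token in text:
--             return href, base
--
--     for entry in links:
--         if len(entry) == 2:
--             text, href = entry  # type: ignore[misc]
--             base = None
--         else:
--             base, text, href = entry  # type: ignore[misc]
--         if token_lower in href.lower():
--             return href, base
--
--     for entry in links:
--         if len(entry) == 2:
--             text, href = entry  # type: ignore[misc]
--             base = None
--         else:
--             base, text, href = entry  # type: ignore[misc]
--         if token_lower in text.lower():
--             return href, base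
--
--     return None, None
-- ===== SOURCE B (Python) =====
-- def pick_matching_link(token, links):
--     """Return `(href, base_path)` pair matching the token, or `(None, None)`."""
--     token_lower = token.lower()
--     first_text = first_href_ci = first_text_ci = None
--     for entry in links:
--         if len(entry) == 2:
--             text, href = entry
--             base = None
--         else:
--             base, text, href = entry
--         if token in href:
--             return href, base  # an exact-href match always wins immediately
--         res = (href, base)
--         if first_text is None and token in text:
--             first_text = res
--         if first_href_ci is None and token_lower in href.lower():
--             first_href_ci = res
--         if first_text_ci is None and token_lower in text.lower():
--             first_text_ci = res
--     return first_text or first_href_ci or first_text_ci or (None, None)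
-- ===== Notes on version B (the rewrite author's own statement) =====
-- stated objective: alternative
-- what changed: A makes up to four full passes over links (href, text, lowercased href, lowercased text, in priority order); B makes a single pass that returns immediately on an exact-href match and otherwise records the first match in each of the three remaining categories, picking the highest-priority recorded one at the end.
import Mathlib
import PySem

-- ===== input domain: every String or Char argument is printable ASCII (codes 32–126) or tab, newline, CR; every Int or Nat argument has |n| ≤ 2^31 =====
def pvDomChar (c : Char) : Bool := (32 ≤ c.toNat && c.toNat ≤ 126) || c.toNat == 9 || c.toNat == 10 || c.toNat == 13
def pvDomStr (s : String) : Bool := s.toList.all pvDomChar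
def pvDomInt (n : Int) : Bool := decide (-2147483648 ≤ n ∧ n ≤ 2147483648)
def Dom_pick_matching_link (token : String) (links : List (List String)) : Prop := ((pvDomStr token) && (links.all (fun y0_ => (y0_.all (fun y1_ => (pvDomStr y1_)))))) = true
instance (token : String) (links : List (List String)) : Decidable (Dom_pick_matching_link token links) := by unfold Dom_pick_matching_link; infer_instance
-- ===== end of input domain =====

-- B replaces A's four priority-ordered passes over the list by one pass that keeps the
-- first match of each weaker category and short-circuits on an exact-href match (objective: alternative).

-- ===== PORT A =====
-- tuple unpacking of an entry: [text, href] → base = None; [base, text, href]; other lengths raise in Python (excluded by Pre_)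
def unpackA (e : List String) : Option String × String × String :=
  match e with
  | [text, href] => (none, text, href)
  | [base, text, href] => (some base, text, href)
  | _ => (none, "", "")

-- first loop: `token in href`
def scanHref (token : String) : List (List String) → Option (Option String × Option String)
  | [] => none
  | e :: t =>
    let (base, _text, href) := unpackA e
    if PySem.Str.isIn token href then some (some href, base) else scanHref token t

-- second loop: `token in text`
def scanText (token : String) : List (List String) → Option (Option String × Option String)
  | [] => none
  | e :: t =>
    let (base, text, href) := unpackA e
    if PySem.Str.isIn token text then some (some href, base) else scanText token t

-- third loop: `token_lower in href.lower()`
def scanHrefL (tl : String) : List (List String) → Option (Option String × Option String)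
  | [] => none
  | e :: t =>
    let (base, _text, href) := unpackA e
    if PySem.Str.isIn tl (PySem.Str.lower href) then some (some href, base) else scanHrefL tl t

-- fourth loop: `token_lower in text.lower()`
def scanTextL (tl : String) : List (List String) → Option (Option String × Option String)
  | [] => none
  | e :: t =>
    let (base, text, href) := unpackA e
    if PySem.Str.isIn tl (PySem.Str.lower text) then some (some href, base) else scanTextL tl t

def pick_matching_link (token : String) (links : List (List String)) : Option String × Option String :=
  let token_lower := PySem.Str.lower token
  match scanHref token links with
  | some r => r
  | none =>
    match scanText token links with
    | some r => r
    | none =>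
      match scanHrefL token_lower links with
      | some r => r
      | none =>
        match scanTextL token_lower links with
        | some r => r
        | none => (none, none)

-- ===== PORT B =====
def unpackB (e : List String) : Option String × String × String :=
  match e with
  | [text, href] => (none, text, href)
  | [base, text, href] => (some base, text, href)
  | _ => (none, "", "")

-- single pass: return at once on `token in href`, otherwise record the first match of each weaker category
def altLoop (token tl : String) :
    List (List String) → Option (Option String × Option String) →
    Option (Option String × Option String) → Option (Option String × Option String) →
    Option String × Option String
  | [], f2, f3, f4 => ((f2.or f3).or f4).getD (none, none)
  | e :: t, f2, f3, f4 =>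
    let (base, text, href) := unpackB e
    if PySem.Str.isIn token href then (some href, base)
    else
      altLoop token tl t
        (f2.or (if PySem.Str.isIn token text then some (some href, base) else none))
        (f3.or (if PySem.Str.isIn tl (PySem.Str.lower href) then some (some href, base) else none))
        (f4.or (if PySem.Str.isIn tl (PySem.Str.lower text) then some (some href, base) else none))

def pick_matching_link_alt (token : String) (links : List (List String)) : Option String × Option String :=
  altLoop token (PySem.Str.lower token) links none none none

-- ===== PRECONDITION & SPEC =====
-- the href field of an entry, as both Pythons unpack it (entry[1] for pairs, entry[2] otherwise)
def preHref (e : List String) : String :=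
  if e.length = 2 then e.getD 1 "" else e.getD 2 ""

-- Pre_ excludes inputs with an entry of length other than 2 or 3 that the programs reach, i.e. one not
-- preceded by an exact-href match: Python's tuple unpacking raises ValueError there (in both A and B).
def Pre_pick_matching_link (token : String) (links : List (List String)) : Prop :=
  ∀ i < links.length, ¬ ((links.getD i []).length = 2 ∨ (links.getD i []).length = 3) →
    ∃ j < i, PySem.Str.isIn token (preHref (links.getD j [])) = true
instance (token : String) (links : List (List String)) : Decidable (Pre_pick_matching_link token links) := by unfold Pre_pick_matching_link; infer_instance

def pvWitness_pick_matching_link : String × List (List String) :=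
  ("doc", [["intro", "a/intro.html"], ["base", "docs page", "b/docs.html"]])

def Spec_pick_matching_link (token : String) (links : List (List String)) (out : Option String × Option String) : Prop := out = pick_matching_link_alt token links
instance (token : String) (links : List (List String)) (out : Option String × Option String) : Decidable (Spec_pick_matching_link token links out) := by unfold Spec_pick_matching_link; infer_instance

-- ===== CLAIM (what is proved, stated in full; the proofs are below) =====
def Claim_equal_pick_matching_link : Prop := ∀ (token : String) (links : List (List String)), Dom_pick_matching_link token links → Pre_pick_matching_link token links → Spec_pick_matching_link token links (pick_matching_link token links)

-- ===== LEMMAS AND PROOFS =====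

-- the single-pass loop with recorded slots equals the four priority-ordered scans of A
theorem altLoop_spec (token tl : String) (ls : List (List String))
    (f2 f3 f4 : Option (Option String × Option String)) :
    altLoop token tl ls f2 f3 f4 =
      match scanHref token ls with
      | some r => r
      | none =>
        (((f2.or (scanText token ls)).or (f3.or (scanHrefL tl ls))).or
          (f4.or (scanTextL tl ls))).getD (none, none) := by
  induction ls generalizing f2 f3 f4 with
  | nil => simp [altLoop, scanHref, scanText, scanHrefL, scanTextL]
  | cons e t ih =>
    simp only [altLoop, scanHref, scanText, scanHrefL, scanTextL]
    by_cases h1 : PySem.Str.isIn token (unpackA e).2.2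
    · simp [unpackB, unpackA] at h1 ⊢
      split <;> simp_all
    · have hB : unpackB e = unpackA e := rfl
      simp only [hB, h1, if_false, ih]
      cases scanHref token t <;>
        simp [Option.or_assoc] <;>
        split_ifs <;> simp [Option.or_assoc]

theorem pick_matching_link_spec : Claim_equal_pick_matching_link := by
  intro token links _dom _pre
  unfold Spec_pick_matching_link pick_matching_link pick_matching_link_alt
  rw [altLoop_spec]
  cases h1 : scanHref token links <;>
    cases h2 : scanText token links <;>
      cases h3 : scanHrefL (PySem.Str.lower token) links <;>
        cases h4 : scanTextL (PySem.Str.lower token) links <;>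
          simp [h1, h2, h3, h4, Option.or]
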